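-- pv_equiv track=rewrite | github.com/lee-seul/baekjoon | 13199.py | count_cp
-- ===== SOURCE A (Python) =====
-- def count_cp(total, amount, need):
--     result = 0
--     while total >= need:
--         temp = total // need
--         result += temp
--         total += temp * amount
--         total -= temp * need
--     return result
-- ===== SOURCE B (Python) =====
-- def count_cp(total, amount, need):
--     # Closed form: each exchange nets (need - amount) bottles per result,
--     # stopping when fewer than `need` remain.
--     if total < need:
--         return 0
--     return (total - amount) // (need - amount)
-- ===== Notes on version B (the rewrite author's own statement) =====
-- stated objective: alternative
-- what changed: Replaced the iterative exchange-simulation loop with a direct closed form (total - amount) // (need - amount) (0 when total < need), derived from the loop invariant total + result*(need-amount) = const; a timing run could not measure a difference (A already runs in microseconds).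
-- outside the precondition, e.g. on count_cp(10, -5, 3): A returns 3, B returns 1; on count_cp(5, 3, 3): A does not finish within the time limit, B raises ZeroDivisionError; on count_cp(5, 0, 0): A raises ZeroDivisionError, B raises ZeroDivisionError
import Mathlib
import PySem

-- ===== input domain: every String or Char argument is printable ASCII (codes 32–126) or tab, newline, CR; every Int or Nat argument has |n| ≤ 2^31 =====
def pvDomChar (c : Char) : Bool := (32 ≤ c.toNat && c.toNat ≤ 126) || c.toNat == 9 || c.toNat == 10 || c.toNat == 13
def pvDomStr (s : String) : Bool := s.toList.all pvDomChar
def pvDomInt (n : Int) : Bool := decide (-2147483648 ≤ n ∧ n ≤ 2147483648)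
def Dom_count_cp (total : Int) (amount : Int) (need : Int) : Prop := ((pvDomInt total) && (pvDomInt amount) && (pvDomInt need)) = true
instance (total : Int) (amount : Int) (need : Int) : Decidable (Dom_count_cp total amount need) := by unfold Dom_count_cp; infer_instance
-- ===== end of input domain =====

-- B replaces A's exchange-simulation loop with the closed form
-- (total - amount) // (need - amount) (0 when total < need), on the natural
-- coupon domain need > amount >= 0 (or the trivial total < need case).


-- ===== PORT A =====
-- A's while loop. The dite guard's extra conjuncts (1 ≤ need ∧ amount < need) are a
-- totality guard only: on inputs violating them Python's loop diverges (or raises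
-- ZeroDivisionError), and all such inputs lie outside Pre_count_cp.
def count_cp_loop (total : Int) (amount : Int) (need : Int) (result : Int) : Int :=
  if h : need ≤ total ∧ 1 ≤ need ∧ amount < need then
    let temp := PySem.Int.floordiv total need
    count_cp_loop (total + temp * amount - temp * need) amount need (result + temp)
  else
    result
termination_by total.toNat
decreasing_by
  obtain ⟨h1, h2, h3⟩ := h
  have ht : 1 ≤ PySem.Int.floordiv total need := by
    rw [PySem.Int.le_floordiv_iff_mul_le (by omega)]; omega
  have hd : PySem.Int.floordiv total need ≤
      PySem.Int.floordiv total need * (need - amount) :=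
    le_mul_of_one_le_right (by omega) (by omega)
  have hr : PySem.Int.floordiv total need * (need - amount) =
      PySem.Int.floordiv total need * need - PySem.Int.floordiv total need * amount := by
    ring
  omega

def count_cp (total : Int) (amount : Int) (need : Int) : Int :=
  count_cp_loop total amount need 0

-- ===== PORT B =====
def count_cp_alt (total : Int) (amount : Int) (need : Int) : Int :=
  if total < need then 0
  else PySem.Int.floordiv (total - amount) (need - amount)

-- ===== PRECONDITION & SPEC =====
-- Pre_ restricts to the natural coupon-exchange domain need > amount ≥ 0, plus all
-- trivial total < need inputs: outside it A loops forever or raises ZeroDivisionError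
-- (need ≤ amount, need ≤ 0 with total ≥ need), or — for negative amount — returns a
-- batch-exchange artefact that no closed form matches (see cites).
def Pre_count_cp (total : Int) (amount : Int) (need : Int) : Prop :=
  total < need ∨ (0 ≤ amount ∧ amount < need)
instance (total : Int) (amount : Int) (need : Int) : Decidable (Pre_count_cp total amount need) := by unfold Pre_count_cp; infer_instance

def pvWitness_count_cp : Int × Int × Int := (20, 2, 5)

def Spec_count_cp (total : Int) (amount : Int) (need : Int) (out : Int) : Prop := out = count_cp_alt total amount need
instance (total : Int) (amount : Int) (need : Int) (out : Int) : Decidable (Spec_count_cp total amount need out) := by unfold Spec_count_cp; infer_instance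

-- ===== CLAIM (what is proved, stated in full; the proofs are below) =====
def Claim_equal_count_cp : Prop := ∀ (total : Int) (amount : Int) (need : Int), Dom_count_cp total amount need → Pre_count_cp total amount need → Spec_count_cp total amount need (count_cp total amount need)

-- ===== LEMMAS AND PROOFS =====

-- Loop invariant: on the natural domain the loop adds the closed form to `result`.
theorem count_cp_loop_closed (total amount need result : Int)
    (ha : 0 ≤ amount) (han : amount < need) :
    count_cp_loop total amount need result =
      result + (if total < need then 0
                else PySem.Int.floordiv (total - amount) (need - amount)) := by
  rw [count_cp_loop]
  by_cases hg : need ≤ total ∧ 1 ≤ need ∧ amount < need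
  · obtain ⟨h1, h2, h3⟩ := hg
    simp only [dif_pos (And.intro h1 (And.intro h2 h3))]
    set t := PySem.Int.floordiv total need with htdef
    have hlow : t * need ≤ total := by
      have := (PySem.Int.floordiv_eq_iff_of_pos (a := total) (b := need) (q := t)
        (by omega)).1 rfl
      omega
    have hhigh : total < (t + 1) * need := by
      have := (PySem.Int.floordiv_eq_iff_of_pos (a := total) (b := need) (q := t)
        (by omega)).1 rfl
      omega
    have ht1 : 1 ≤ t := by
      rw [htdef, PySem.Int.le_floordiv_iff_mul_le (by omega)]; omega
    have ih := count_cp_loop_closed (total + t * amount - t * need) amount need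
      (result + t) ha han
    rw [ih]
    by_cases hlt : total + t * amount - t * need < need
    · -- loop terminates after this pass: closed form on total equals t
      have hq : PySem.Int.floordiv (total - amount) (need - amount) = t := by
        rw [PySem.Int.floordiv_eq_iff_of_pos (by omega)]
        constructor
        · nlinarith
        · nlinarith
      simp only [if_pos hlt, if_neg (by omega : ¬ total < need), hq]
      ring
    · -- loop continues: peel one quotient off the closed form
      have hq : PySem.Int.floordiv (total - amount) (need - amount) =
          t + PySem.Int.floordiv (total + t * amount - t * need - amount)
            (need - amount) := by
        set q := PySem.Int.floordiv (total + t * amount - t * need - amount)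
          (need - amount) with hqdef
        have hb := (PySem.Int.floordiv_eq_iff_of_pos
          (a := total + t * amount - t * need - amount) (b := need - amount) (q := q)
          (by omega)).1 rfl
        rw [PySem.Int.floordiv_eq_iff_of_pos (by omega)]
        constructor
        · nlinarith [hb.1]
        · nlinarith [hb.2]
      simp only [if_neg hlt, if_neg (by omega : ¬ total < need), hq]
      ring
  · simp only [dif_neg hg]
    have hlt : total < need := by omega
    simp [hlt]
termination_by total.toNat
decreasing_by
  have hd : PySem.Int.floordiv total need ≤
      PySem.Int.floordiv total need * (need - amount) :=
    le_mul_of_one_le_right (by omega) (by omega)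
  have hr : PySem.Int.floordiv total need * (need - amount) =
      PySem.Int.floordiv total need * need - PySem.Int.floordiv total need * amount := by
    ring
  omega

-- ===== VERDICT (by name: the statement is the Claim_ definition above) =====
theorem count_cp_spec : Claim_equal_count_cp := by
  intro total amount need _ hpre
  unfold Spec_count_cp count_cp count_cp_alt
  rcases hpre with hlt | ⟨ha, han⟩
  · rw [count_cp_loop]
    simp [dif_neg, hlt]
  · rw [count_cp_loop_closed total amount need 0 ha han]
    simp
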